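-- pv_equiv track=rewrite | github.com/Soiiii/PythonTest | Test/test59.py | solution
-- ===== SOURCE A (Python) =====
-- def solution(arr):
--     answer = []
--     result = []
--     if 2 in arr:
--         for a in range(len(arr)):
--             if arr[a] == 2:
--                 answer.append(a)
--         if len(answer) > 1:
--             result = arr[answer[0]:answer[-1]+1]
--         else:
--             result.append(arr[answer[0]])
--     else:
--         result.append(-1)
--     return result
-- ===== SOURCE B (Python) =====
-- def solution(arr):
--     # Trim non-2 elements off the tail by popping, then off the head (via reverse+pop).
--     kept = list(arr)
--     while kept and kept[-1] != 2:
--         kept.pop()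
--     if not kept:
--         return [-1]
--     kept.reverse()
--     while kept[-1] != 2:
--         kept.pop()
--     kept.reverse()
--     return kept
-- ===== Notes on version B (the rewrite author's own statement) =====
-- stated objective: alternative
-- what changed: Instead of collecting every index of 2 and slicing between the first and last of them, B never computes an index: it trims non-2 elements off the tail by popping (returning [-1] if everything is trimmed away), then reverses and trims the other end the same way, so the kept elements are exactly the segment between the outermost 2s.
import Mathlib
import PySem

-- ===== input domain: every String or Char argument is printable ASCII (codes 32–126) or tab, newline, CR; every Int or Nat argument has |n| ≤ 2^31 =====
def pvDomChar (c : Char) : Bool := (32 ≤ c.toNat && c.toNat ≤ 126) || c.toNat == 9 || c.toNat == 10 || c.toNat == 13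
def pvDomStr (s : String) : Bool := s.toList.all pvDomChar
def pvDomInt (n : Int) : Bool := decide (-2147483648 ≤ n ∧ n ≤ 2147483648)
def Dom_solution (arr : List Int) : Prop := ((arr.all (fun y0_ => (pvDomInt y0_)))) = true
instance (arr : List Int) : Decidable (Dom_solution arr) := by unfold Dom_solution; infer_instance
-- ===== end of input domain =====

-- B replaces A's index-collection-and-slice scheme by index-free trimming: pop non-2 elements
-- off the tail, reverse, pop the other end, reverse back; objective: alternative decomposition.

-- ===== PORT A =====
def solution (arr : List Int) : List Int :=
  if arr.contains 2 then
    -- 'for a in range(len(arr)): if arr[a] == 2: answer.append(a)'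
    let answer : List Int :=
      (PySem.List.pyRange 0 (arr.length : Int) 1).foldl
        (fun acc a => if PySem.List.pyGet? arr a = some 2 then acc ++ [a] else acc) []
    if 1 < answer.length then
      PySem.List.slice arr (some (PySem.List.pyGetD answer 0 0))
        (some (PySem.List.pyGetD answer (-1) 0 + 1))
    else
      [PySem.List.pyGetD arr (PySem.List.pyGetD answer 0 0) 0]
  else
    [-1]

-- ===== PORT B =====
-- 'while kept and kept[-1] != 2: kept.pop()' — popping the last element while it is not 2
-- is, structurally, dropWhile on the reversed list, undone by the outer reverses.
def popTrail (xs : List Int) : List Int :=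
  (xs.reverse.dropWhile (fun x => !(x == 2))).reverse

def solution_alt (arr : List Int) : List Int :=
  let kept := popTrail arr
  if kept = [] then [-1]
  else (popTrail kept.reverse).reverse

-- ===== PRECONDITION & SPEC =====
def Spec_solution (arr : List Int) (out : List Int) : Prop := out = solution_alt arr
instance (arr : List Int) (out : List Int) : Decidable (Spec_solution arr out) := by unfold Spec_solution; infer_instance

-- ===== CLAIM =====
def Claim_equal_solution : Prop := ∀ (arr : List Int), Dom_solution arr → Spec_solution arr (solution arr)

-- ===== LEMMAS AND PROOFS =====

-- the list of indices of 2 in arr (what A's loop collects, over Nat)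
def idxs (arr : List Int) : List Nat :=
  (List.range arr.length).filter (fun i => decide (arr[i]? = some (2:Int)))

theorem idxs_cons (a : Int) (arr : List Int) :
    idxs (a :: arr) = (if a = 2 then [0] else []) ++ (idxs arr).map (· + 1) := by
  simp only [idxs, List.length_cons, List.range_succ_eq_map, List.filter_cons,
    List.filter_map]
  split_ifs with h <;>
    simp_all [Function.comp_def, Nat.succ_eq_add_one, List.getElem?_cons_succ] <;>
    exact List.map_congr_left (fun x _ => rfl)

theorem idxs_append (arr : List Int) (a : Int) :
    idxs (arr ++ [a]) = idxs arr ++ (if a = 2 then [arr.length] else []) := by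
  simp only [idxs, List.length_append, List.length_singleton, List.range_succ,
    List.filter_append]
  congr 1
  · apply List.filter_congr
    intro i hi
    rw [List.getElem?_append_left (by simpa using List.mem_range.mp hi)]
  · by_cases h : a = 2 <;>
      simp [h]

theorem idxs_head? (arr : List Int) :
    (idxs arr).head? = List.idxOf? (2:Int) arr := by
  induction arr with
  | nil => simp [idxs]
  | cons a arr ih =>
    rw [idxs_cons, List.idxOf?_cons]
    by_cases h : a = 2
    · simp [h]
    · simp only [h, beq_iff_eq, if_false, List.nil_append, ← ih]
      cases idxs arr <;> simp

theorem idxs_getLast? (arr : List Int) :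
    (idxs arr).getLast? = (List.idxOf? (2:Int) arr.reverse).map (fun r => arr.length - 1 - r) := by
  induction arr using List.reverseRecOn with
  | nil => simp [idxs]
  | append_singleton arr a ih =>
    rw [idxs_append, List.reverse_append]
    simp only [List.reverse_singleton, List.singleton_append, List.idxOf?_cons,
      List.length_append, List.length_singleton]
    by_cases h : a = 2
    · simp [h]
    · simp only [h, if_false, List.append_nil, beq_iff_eq]
      rw [ih, Option.map_map]
      cases List.idxOf? (2:Int) arr.reverse
      · simp
      · simp only [Option.map_some, Function.comp_apply]
        congr 1
        omega

theorem mem_idxs {arr : List Int} {k : Nat} (h : k ∈ idxs arr) :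
    k < arr.length ∧ arr[k]? = some 2 := by
  simp only [idxs, List.mem_filter, List.mem_range, decide_eq_true_eq] at h
  exact h

theorem answer_eq (arr : List Int) :
    (PySem.List.pyRange 0 (arr.length : Int) 1).foldl
      (fun acc a => if PySem.List.pyGet? arr a = some 2 then acc ++ [a] else acc) []
      = (idxs arr).map (fun k : Nat => (k : Int)) := by
  rw [PySem.List.pyRange_zero_natCast, PySem.List.foldl_append_ite_eq_filter, List.nil_append,
    List.filter_map]
  have hfun : ((fun x => decide (PySem.List.pyGet? arr x = some (2:Int))) ∘ (fun k : Nat => (k:Int)))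
      = (fun i => decide (arr[i]? = some (2:Int))) := by
    funext i
    simp [PySem.List.pyGet?_natCast]
  rw [hfun, idxs]

-- dropWhile (≠ 2) drops exactly up to the first index of 2
theorem dropWhile_eq_drop_index {xs : List Int} {f : Nat}
    (h : PySem.List.index? xs 2 = some f) :
    xs.dropWhile (fun x => !(x == 2)) = xs.drop f := by
  induction xs generalizing f with
  | nil => simp [PySem.List.index?] at h
  | cons a xs ih =>
    by_cases ha : a = 2
    · subst ha
      rw [PySem.List.index?_cons_self] at h
      cases h
      simp [List.dropWhile]
    · rw [PySem.List.index?_cons_of_ne _ ha] at h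
      cases hf' : PySem.List.index? xs 2 with
      | none => rw [hf'] at h; simp at h
      | some f' =>
        rw [hf'] at h
        simp only [Option.map_some] at h
        cases h
        have hb : (a == (2:Int)) = false := by simpa using ha
        simpa [List.dropWhile, hb] using ih hf'

theorem dropWhile_eq_nil_of_not_mem {xs : List Int} (h : (2:Int) ∉ xs) :
    xs.dropWhile (fun x => !(x == 2)) = [] := by
  induction xs with
  | nil => simp
  | cons a xs ih =>
    have ha : a ≠ 2 := fun hc => h (by simp [hc])
    have hb : (a == (2:Int)) = false := by simpa using ha
    simpa [List.dropWhile, hb] using ih (fun hc => h (List.mem_cons_of_mem _ hc))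

-- B's result when 2 occurs: take to after the last 2, then drop to the first 2
theorem solution_alt_char {arr : List Int} {f r : Nat}
    (hf : PySem.List.index? arr 2 = some f)
    (hr : PySem.List.index? arr.reverse 2 = some r) :
    solution_alt arr = (arr.take (arr.length - r)).drop f := by
  have h2 : (2:Int) ∈ arr := by
    obtain ⟨hfl, hfv, -⟩ := PySem.List.getElem_of_index?_eq_some hf
    exact hfv ▸ List.getElem_mem hfl
  have hrlt : r < arr.length := by
    obtain ⟨hk, -, -⟩ := PySem.List.getElem_of_index?_eq_some hr
    simpa using hk
  -- first trim: popTrail arr = arr.take (arr.length - r)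
  have h1 : popTrail arr = arr.take (arr.length - r) := by
    rw [popTrail, dropWhile_eq_drop_index hr, List.drop_reverse, List.reverse_reverse]
  have hkept_ne : arr.take (arr.length - r) ≠ [] := by
    apply List.ne_nil_of_length_pos
    rw [List.length_take]
    omega
  -- the first index of 2 survives the take: f ≤ arr.length - 1 - r < arr.length - r
  obtain ⟨hfl, hfv, hfmin⟩ := PySem.List.getElem_of_index?_eq_some hf
  obtain ⟨hrl, hrv, -⟩ := PySem.List.getElem_of_index?_eq_some hr
  rw [List.getElem_reverse] at hrv
  have hfle : f ≤ arr.length - 1 - r := by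
    by_contra hcon
    exact hfmin _ (by omega) hrv
  have hXlen : f < (arr.take (arr.length - r)).length := by
    rw [List.length_take]; omega
  have hXf : (arr.take (arr.length - r))[f]'hXlen = 2 := by
    rw [List.getElem_take]; exact hfv
  have hf' : PySem.List.index? (arr.take (arr.length - r)) 2 = some f := by
    rw [PySem.List.index?_eq_some_iff]
    refine ⟨(arr.take (arr.length - r)).take f, (arr.take (arr.length - r)).drop (f + 1), ?_, ?_, ?_⟩
    · rw [← hXf, ← List.drop_eq_getElem_cons hXlen, List.take_append_drop]
    · rw [List.length_take, List.length_take]; omega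
    · intro hmem
      rw [List.take_take, min_eq_left (by omega)] at hmem
      obtain ⟨j, hj, hjv⟩ := List.mem_iff_getElem.mp hmem
      rw [List.length_take, min_eq_left (by omega)] at hj
      rw [List.getElem_take] at hjv
      exact hfmin j hj hjv
  unfold solution_alt
  rw [h1, if_neg hkept_ne]
  unfold popTrail
  simp only [List.reverse_reverse]
  rw [dropWhile_eq_drop_index hf']

-- ===== VERDICT (by name: the statement is the Claim_ definition above) =====
theorem solution_spec : Claim_equal_solution := by
  intro arr _
  unfold Spec_solution
  by_cases h2 : (2:Int) ∈ arr
  · cases hf : PySem.List.index? arr 2 with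
    | none => exact absurd h2 ((PySem.List.index?_eq_none_iff arr 2).mp hf)
    | some f =>
    cases hr : PySem.List.index? arr.reverse 2 with
    | none =>
      exact absurd (List.mem_reverse.mpr h2)
        ((PySem.List.index?_eq_none_iff arr.reverse 2).mp hr)
    | some r =>
    rw [solution_alt_char hf hr]
    have hrlt : r < arr.length := by
      obtain ⟨hk, -, -⟩ := PySem.List.getElem_of_index?_eq_some hr
      simpa using hk
    unfold solution
    have hc : arr.contains 2 = true := by simpa using h2
    rw [if_pos hc, answer_eq]
    have hhead : (idxs arr).head? = some f := by
      rw [idxs_head?, ← PySem.List.index?_eq_idxOf?, hf]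
    have hlast : (idxs arr).getLast? = some (arr.length - 1 - r) := by
      rw [idxs_getLast?, ← PySem.List.index?_eq_idxOf?, hr, Option.map_some]
    obtain ⟨j, t, hjt⟩ : ∃ j t, idxs arr = j :: t := by
      cases h : idxs arr with
      | nil => rw [h] at hhead; simp at hhead
      | cons j t => exact ⟨j, t, rfl⟩
    rw [hjt] at hhead hlast
    have hjf : j = f := by simpa using hhead
    have hj2 : arr[j]? = some 2 ∧ j < arr.length := by
      have := mem_idxs (arr := arr) (k := j) (by rw [hjt]; exact List.mem_cons_self)
      exact ⟨this.2, this.1⟩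
    rw [hjt]
    subst hjf
    rw [List.drop_take]
    cases t with
    | nil =>
      -- single occurrence: j = arr.length - 1 - r
      have hjr : j = arr.length - 1 - r := by simpa using hlast
      simp only [List.map_cons, List.map_nil, List.length_cons, List.length_nil]
      rw [if_neg (by omega), PySem.List.pyGetD_zero_cons, PySem.List.pyGetD_natCast]
      have hn1 : arr.length - r - j = 1 := by omega
      rw [hn1, List.take_one_drop_eq_of_lt_length hj2.2]
      have h2v : arr[j] = 2 := by
        have h := hj2.1
        rw [List.getElem?_eq_getElem hj2.2] at h
        exact Option.some.inj h
      rw [List.getD_eq_getElem arr 0 hj2.2]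
      simp [List.get_eq_getElem, h2v]
    | cons x t' =>
      rw [if_pos (by simp only [List.length_map, List.length_cons]; omega)]
      rw [List.map_cons, PySem.List.pyGetD_zero_cons]
      have hne : ((j:Int) :: ((x::t').map (fun k : Nat => (k : Int)))) ≠ [] := by simp
      rw [PySem.List.pyGetD_neg_one _ 0 hne]
      have hm : ((j:Int) :: (x::t').map (fun k : Nat => (k : Int))).getLast?
          = some (((arr.length - 1 - r : Nat) : Int)) := by
        rw [← List.map_cons, List.getLast?_map, hlast, Option.map_some]
      rw [List.getLast?_eq_some_getLast hne] at hm
      rw [Option.some.inj hm]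
      have hbd : (((arr.length - 1 - r : Nat) : Int)) + 1 = (j : Int) + ((arr.length - r - j : Nat) : Int) := by
        have hfle : j ≤ arr.length - 1 - r := by
          obtain ⟨hfl, hfv, hfmin⟩ := PySem.List.getElem_of_index?_eq_some hf
          obtain ⟨hrl, hrv, -⟩ := PySem.List.getElem_of_index?_eq_some hr
          rw [List.getElem_reverse] at hrv
          by_contra hcon
          exact hfmin _ (by omega) hrv
        omega
      rw [hbd, PySem.List.slice_natCast_add]
  · have halt : solution_alt arr = [-1] := by
      have hp : popTrail arr = [] := by
        rw [popTrail, dropWhile_eq_nil_of_not_mem (by simpa using h2)]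
        simp
      simp [solution_alt, hp]
    rw [halt]
    unfold solution
    rw [if_neg (by simpa using h2)]
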